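-- pv_equiv track=rewrite | github.com/cradlepoint/api-samples | scripts/Private Router Manager/app.py | get_router_credentials
-- ===== SOURCE A (Python) =====
-- def get_router_credentials(router, headers, same_creds, default_user, default_pass):
--     """Get username/password for a router row"""
--     if same_creds:
--         return default_user, default_pass
--     user_idx = next((i for i, h in enumerate(headers) if str(h).strip().lower() in ("username", "user")), None)
--     pass_idx = next((i for i, h in enumerate(headers) if str(h).strip().lower() in ("password", "pass")), None)
--     if user_idx is None or pass_idx is None:
--         return None, None
--     return (
--         str(router[user_idx]).strip() if user_idx < len(router) else "",
--         str(router[pass_idx]).strip() if pass_idx < len(router) else "",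
--     )
-- ===== SOURCE B (Python) =====
-- def get_router_credentials(router, headers, same_creds, default_user, default_pass):
--     """Get username/password for a router row"""
--     if same_creds:
--         return default_user, default_pass
--     first = {}
--     for i, h in enumerate(headers):
--         first.setdefault(str(h).strip().lower(), i)
--     user_idx = min((first[k] for k in ("username", "user") if k in first), default=None)
--     pass_idx = min((first[k] for k in ("password", "pass") if k in first), default=None)
--     if user_idx is None or pass_idx is None:
--         return None, None
--     return (
--         str(router[user_idx]).strip() if user_idx < len(router) else "",
--         str(router[pass_idx]).strip() if pass_idx < len(router) else "",
--     )
-- ===== Notes on version B (the rewrite author's own statement) =====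
-- stated objective: idiomatic
-- what changed: Replaces A's two next(...) generator scans over headers with a single pass that records each normalized header's first index in a dict via setdefault, then takes the minimum recorded index among the candidate names for user and password.
import Mathlib
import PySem

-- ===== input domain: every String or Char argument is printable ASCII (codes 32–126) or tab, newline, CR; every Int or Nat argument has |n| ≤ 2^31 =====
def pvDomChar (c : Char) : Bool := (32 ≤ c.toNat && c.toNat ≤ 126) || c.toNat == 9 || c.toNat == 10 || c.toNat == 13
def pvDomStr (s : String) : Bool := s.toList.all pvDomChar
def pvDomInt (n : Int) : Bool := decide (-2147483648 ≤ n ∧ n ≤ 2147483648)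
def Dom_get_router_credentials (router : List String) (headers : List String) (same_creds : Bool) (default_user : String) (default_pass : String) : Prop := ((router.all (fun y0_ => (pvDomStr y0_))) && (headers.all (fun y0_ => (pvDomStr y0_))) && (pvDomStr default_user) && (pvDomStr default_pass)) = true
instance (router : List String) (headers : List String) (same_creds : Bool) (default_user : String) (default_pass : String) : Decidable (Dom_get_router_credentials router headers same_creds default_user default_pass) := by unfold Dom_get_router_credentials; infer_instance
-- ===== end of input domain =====

-- B replaces A's two next(...) generator scans by one setdefault pass building a
-- first-index dict, then takes the min candidate index (idiomatic one-pass form; same cost).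

-- ===== PORT A =====
-- str(h).strip().lower()
def pvNormA (h : String) : String := PySem.Str.lower (PySem.Str.strip h)

-- enumerate(headers) (Nat indices since they start at 0)
def pvEnumA (n : Nat) : List String → List (Nat × String)
  | [] => []
  | h :: t => (n, h) :: pvEnumA (n + 1) t

-- next((i for i, h in enumerate(headers) if norm(h) in names), None)
def pvNextIdx (names : List String) : List (Nat × String) → Option Nat
  | [] => none
  | (i, h) :: rest => if pvNormA h ∈ names then some i else pvNextIdx names rest

def get_router_credentials (router : List String) (headers : List String) (same_creds : Bool) (default_user : String) (default_pass : String) : Option String × Option String :=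
  if same_creds then (some default_user, some default_pass)
  else
    let user_idx := pvNextIdx ["username", "user"] (pvEnumA 0 headers)
    let pass_idx := pvNextIdx ["password", "pass"] (pvEnumA 0 headers)
    match user_idx, pass_idx with
    | some u, some p =>
        (some (if u < router.length then PySem.Str.strip (router.getD u "") else ""),
         some (if p < router.length then PySem.Str.strip (router.getD p "") else ""))
    | _, _ => (none, none)

-- ===== PORT B =====
-- str(h).strip().lower()
def pvNormB (h : String) : String := PySem.Str.lower (PySem.Str.strip h)

-- enumerate(headers) (Nat indices since they start at 0)
def pvEnumB (n : Nat) : List String → List (Nat × String)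
  | [] => []
  | h :: t => (n, h) :: pvEnumB (n + 1) t

-- for i, h in enumerate(headers): first.setdefault(norm(h), i)
def pvFirstMap (l : List (Nat × String)) : PySem.Dict String Nat :=
  l.foldl (fun d p => d.setdefault (pvNormB p.2) p.1) PySem.Dict.empty

-- min((first[k] for k in (n1, n2) if k in first), default=None)
def pvMinOpt : Option Nat → Option Nat → Option Nat
  | some a, some b => some (min a b)
  | some a, none => some a
  | none, o => o

-- str(router[idx]).strip() if idx < len(router) else ""
def pvCell (router : List String) (i : Nat) : String :=
  if i < router.length then PySem.Str.strip (router.getD i "") else ""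

def get_router_credentials_alt (router : List String) (headers : List String) (same_creds : Bool) (default_user : String) (default_pass : String) : Option String × Option String :=
  if same_creds then (some default_user, some default_pass)
  else
    let first := pvFirstMap (pvEnumB 0 headers)
    let user_idx := pvMinOpt (first.get? "username") (first.get? "user")
    let pass_idx := pvMinOpt (first.get? "password") (first.get? "pass")
    if user_idx.isNone || pass_idx.isNone then (none, none)
    else (some (pvCell router (user_idx.getD 0)), some (pvCell router (pass_idx.getD 0)))

-- ===== PRECONDITION & SPEC =====
def Spec_get_router_credentials (router : List String) (headers : List String) (same_creds : Bool) (default_user : String) (default_pass : String) (out : Option String × Option String) : Prop := out = get_router_credentials_alt router headers same_creds default_user default_pass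
instance (router : List String) (headers : List String) (same_creds : Bool) (default_user : String) (default_pass : String) (out : Option String × Option String) : Decidable (Spec_get_router_credentials router headers same_creds default_user default_pass out) := by unfold Spec_get_router_credentials; infer_instance

-- ===== CLAIM (what is proved, stated in full; the proofs are below) =====
def Claim_equal_get_router_credentials : Prop := ∀ (router : List String) (headers : List String) (same_creds : Bool) (default_user : String) (default_pass : String), Dom_get_router_credentials router headers same_creds default_user default_pass → Spec_get_router_credentials router headers same_creds default_user default_pass (get_router_credentials router headers same_creds default_user default_pass)

-- ===== LEMMAS AND PROOFS =====

theorem pvNorm_eq (h : String) : pvNormA h = pvNormB h := rfl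

theorem pvEnum_eq (n : Nat) (t : List String) : pvEnumA n t = pvEnumB n t := by
  induction t generalizing n with
  | nil => rfl
  | cons x xs ih => simp [pvEnumA, pvEnumB, ih]

-- first occurrence of key k in an index/header list
def pvFindN (k : String) : List (Nat × String) → Option Nat
  | [] => none
  | (i, h) :: rest => if pvNormB h == k then some i else pvFindN k rest

theorem pvFirstMap_get (k : String) (l : List (Nat × String)) (d : PySem.Dict String Nat) :
    (l.foldl (fun d p => d.setdefault (pvNormB p.2) p.1) d).get? k = (d.get? k).or (pvFindN k l) := by
  induction l generalizing d with
  | nil => simp [pvFindN]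
  | cons p rest ih =>
    simp only [List.foldl_cons, ih, pvFindN]
    by_cases hk : pvNormB p.2 = k
    · subst hk
      rw [PySem.Dict.get?_setdefault_self]
      cases h : d.get? (pvNormB p.2) <;> simp [Option.or]
    · rw [PySem.Dict.get?_setdefault_of_ne d p.1 (Ne.symm hk)]
      simp [hk]

theorem pvFindN_ge (k : String) (t : List String) (m j : Nat)
    (h : pvFindN k (pvEnumB m t) = some j) : m ≤ j := by
  induction t generalizing m with
  | nil => simp [pvEnumB, pvFindN] at h
  | cons x xs ih =>
    simp only [pvEnumB, pvFindN] at h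
    split at h
    · cases h; omega
    · have := ih (m + 1) h; omega

theorem pvNextIdx_eq_min (n1 n2 : String) (hne : n1 ≠ n2) (t : List String) (m : Nat) :
    pvNextIdx [n1, n2] (pvEnumB m t) =
      pvMinOpt (pvFindN n1 (pvEnumB m t)) (pvFindN n2 (pvEnumB m t)) := by
  induction t generalizing m with
  | nil => rfl
  | cons x xs ih =>
    simp only [pvEnumB, pvNextIdx, pvFindN, pvNorm_eq]
    by_cases h1 : pvNormB x = n1
    · have h2 : pvNormB x ≠ n2 := fun h => hne (h1.symm.trans h)
      rw [if_pos (by simp [h1]), if_pos (by simp [h1]), if_neg (by simp [h2])]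
      cases hf : pvFindN n2 (pvEnumB (m + 1) xs) with
      | none => rfl
      | some j =>
        have hj := pvFindN_ge n2 xs (m + 1) j hf
        simp only [pvMinOpt]
        congr 1
        omega
    · by_cases h2 : pvNormB x = n2
      · rw [if_pos (by simp [h2]), if_neg (by simp [h1]), if_pos (by simp [h2])]
        cases hf : pvFindN n1 (pvEnumB (m + 1) xs) with
        | none => rfl
        | some j =>
          have hj := pvFindN_ge n1 xs (m + 1) j hf
          simp only [pvMinOpt]
          congr 1
          omega
      · rw [if_neg (by simp [h1, h2]), if_neg (by simp [h1]), if_neg (by simp [h2])]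
        exact ih (m + 1)

theorem pvIdx_eq (n1 n2 : String) (hne : n1 ≠ n2) (headers : List String) :
    pvNextIdx [n1, n2] (pvEnumB 0 headers) =
      pvMinOpt ((pvFirstMap (pvEnumB 0 headers)).get? n1) ((pvFirstMap (pvEnumB 0 headers)).get? n2) := by
  rw [pvNextIdx_eq_min n1 n2 hne]
  unfold pvFirstMap
  rw [pvFirstMap_get, pvFirstMap_get]
  simp [Option.or]

-- ===== VERDICT (by name: the statement is the Claim_ definition above) =====
theorem get_router_credentials_spec : Claim_equal_get_router_credentials := by
  intro router headers same_creds default_user default_pass _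
  unfold Spec_get_router_credentials get_router_credentials get_router_credentials_alt
  cases same_creds with
  | true => rfl
  | false =>
    simp only [Bool.false_eq_true, if_false]
    rw [pvEnum_eq]
    rw [← pvIdx_eq "username" "user" (by decide), ← pvIdx_eq "password" "pass" (by decide)]
    cases pvNextIdx ["username", "user"] (pvEnumB 0 headers) <;>
      cases pvNextIdx ["password", "pass"] (pvEnumB 0 headers) <;>
      simp [pvCell]
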